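-- pv_equiv track=rewrite | github.com/RobertPennefather/CITS5502 | defect.py | major_first
-- ===== SOURCE A (Python) =====
-- def major_first(hours_remaining, defects):
--
--     while hours_remaining > 0:
--
--         if defects[2] > 0 and hours_remaining >= 2: # Easy, Major
--             hours_remaining -= 2
--             defects[2] -= 1
--
--         elif defects[0] > 0 and hours_remaining >= 5: # Hard, Major
--             hours_remaining -= 5
--             defects[0] -= 1
--
--         elif defects[3] > 0 and hours_remaining >= 2: # Easy, Minor
--             hours_remaining -= 2
--             defects[3] -= 1
--
--         elif defects[1] > 0 and hours_remaining >= 5: # Hard, Minor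
--             hours_remaining -= 5
--             defects[1] -= 1
--
--         else: # No defects left
--             break
--
--     return defects
-- ===== SOURCE B (Python) =====
-- def major_first(hours_remaining, defects):
--     # Closed-form greedy: per category, in priority order (Easy/Major, Hard/Major,
--     # Easy/Minor, Hard/Minor), fix min(count, remaining // cost) at once.
--     if hours_remaining > 0:
--         hr = hours_remaining
--         for i, cost in ((2, 2), (0, 5), (3, 2), (1, 5)):
--             n = min(defects[i], hr // cost)
--             if n > 0:
--                 defects[i] -= n
--                 hr -= cost * n
--     return defects
-- ===== Notes on version B (the rewrite author's own statement) =====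
-- stated objective: simpler
-- what changed: Replaced the one-defect-per-iteration while loop with a single closed-form pass over the four categories in the same priority order, fixing min(count, remaining//cost) defects of each category at once.
-- outside the precondition, e.g. on major_first(2, [9, 9, 9]): A returns [9, 9, 8], B raises IndexError
import Mathlib
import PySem

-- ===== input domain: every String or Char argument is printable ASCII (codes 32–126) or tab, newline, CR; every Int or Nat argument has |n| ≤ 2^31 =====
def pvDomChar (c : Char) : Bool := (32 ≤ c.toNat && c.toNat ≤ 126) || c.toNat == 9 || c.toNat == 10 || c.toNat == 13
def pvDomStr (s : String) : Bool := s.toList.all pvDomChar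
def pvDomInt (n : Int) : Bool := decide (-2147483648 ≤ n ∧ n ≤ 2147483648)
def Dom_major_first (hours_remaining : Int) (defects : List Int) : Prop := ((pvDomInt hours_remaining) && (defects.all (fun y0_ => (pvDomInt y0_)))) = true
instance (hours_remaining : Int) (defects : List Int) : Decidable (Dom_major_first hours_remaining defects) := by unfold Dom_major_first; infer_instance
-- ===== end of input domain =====

-- B replaces A's one-defect-per-iteration while loop by a single closed-form
-- pass over the four categories (min(count, remaining // cost)) in the same
-- priority order; both mutate `defects` in Python, the theorems are about the
-- returned value.


-- ===== PORT A =====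
-- `defects[i]` is ported as `.getD i 0`: Pre_major_first guarantees the index is
-- in range whenever the loop body runs, so the default is never consulted.
def major_first (hours_remaining : Int) (defects : List Int) : List Int :=
  if h : 0 < hours_remaining then
    if 0 < defects.getD 2 0 ∧ 2 ≤ hours_remaining then       -- Easy, Major
      major_first (hours_remaining - 2) (defects.set 2 (defects.getD 2 0 - 1))
    else if 0 < defects.getD 0 0 ∧ 5 ≤ hours_remaining then  -- Hard, Major
      major_first (hours_remaining - 5) (defects.set 0 (defects.getD 0 0 - 1))
    else if 0 < defects.getD 3 0 ∧ 2 ≤ hours_remaining then  -- Easy, Minor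
      major_first (hours_remaining - 2) (defects.set 3 (defects.getD 3 0 - 1))
    else if 0 < defects.getD 1 0 ∧ 5 ≤ hours_remaining then  -- Hard, Minor
      major_first (hours_remaining - 5) (defects.set 1 (defects.getD 1 0 - 1))
    else defects                                              -- break
  else defects
termination_by hours_remaining.toNat
decreasing_by all_goals omega

-- ===== PORT B =====
-- one step of B's for-loop: fix min(defects[i], hr // cost) defects of category i
def pvFixCat (st : List Int × Int) (ic : Nat × Int) : List Int × Int :=
  let n := min (st.1.getD ic.1 0) (PySem.Int.floordiv st.2 ic.2)
  if 0 < n then (st.1.set ic.1 (st.1.getD ic.1 0 - n), st.2 - ic.2 * n) else st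

def major_first_alt (hours_remaining : Int) (defects : List Int) : List Int :=
  if 0 < hours_remaining then
    ([(2, 2), (0, 5), (3, 2), (1, 5)].foldl pvFixCat (defects, hours_remaining)).1
  else defects

-- ===== PRECONDITION & SPEC =====
-- Pre_ excludes lists shorter than 4 when hours_remaining > 0: there Python A
-- raises IndexError on most inputs but can still return a value when the hours
-- run out before an out-of-range index is read (e.g. (2, [9, 9, 9])), while B's
-- fixed four-category pass raises IndexError on every such list.
def Pre_major_first (hours_remaining : Int) (defects : List Int) : Prop :=
  hours_remaining ≤ 0 ∨ 4 ≤ defects.length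
instance (hours_remaining : Int) (defects : List Int) : Decidable (Pre_major_first hours_remaining defects) := by unfold Pre_major_first; infer_instance

def pvWitness_major_first : Int × List Int := (10, [1, 2, 3, 4])

def Spec_major_first (hours_remaining : Int) (defects : List Int) (out : List Int) : Prop := out = major_first_alt hours_remaining defects
instance (hours_remaining : Int) (defects : List Int) (out : List Int) : Decidable (Spec_major_first hours_remaining defects out) := by unfold Spec_major_first; infer_instance

-- ===== CLAIM (what is proved, stated in full; the proofs are below) =====
def Claim_equal_major_first : Prop := ∀ (hours_remaining : Int) (defects : List Int), Dom_major_first hours_remaining defects → Pre_major_first hours_remaining defects → Spec_major_first hours_remaining defects (major_first hours_remaining defects)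

-- ===== LEMMAS AND PROOFS =====

-- the residual loops of A after each priority class is exhausted
def pvLoop0 (hr : Int) (d : List Int) : List Int :=
  if h : 0 < hr then
    if 0 < d.getD 0 0 ∧ 5 ≤ hr then pvLoop0 (hr - 5) (d.set 0 (d.getD 0 0 - 1))
    else if 0 < d.getD 3 0 ∧ 2 ≤ hr then pvLoop0 (hr - 2) (d.set 3 (d.getD 3 0 - 1))
    else if 0 < d.getD 1 0 ∧ 5 ≤ hr then pvLoop0 (hr - 5) (d.set 1 (d.getD 1 0 - 1))
    else d
  else d
termination_by hr.toNat
decreasing_by all_goals omega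

def pvLoop3 (hr : Int) (d : List Int) : List Int :=
  if h : 0 < hr then
    if 0 < d.getD 3 0 ∧ 2 ≤ hr then pvLoop3 (hr - 2) (d.set 3 (d.getD 3 0 - 1))
    else if 0 < d.getD 1 0 ∧ 5 ≤ hr then pvLoop3 (hr - 5) (d.set 1 (d.getD 1 0 - 1))
    else d
  else d
termination_by hr.toNat
decreasing_by all_goals omega

def pvLoop1 (hr : Int) (d : List Int) : List Int :=
  if h : 0 < hr then
    if 0 < d.getD 1 0 ∧ 5 ≤ hr then pvLoop1 (hr - 5) (d.set 1 (d.getD 1 0 - 1))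
    else d
  else d
termination_by hr.toNat
decreasing_by all_goals omega

theorem pv_getD_set_ne (d : List Int) {i j : Nat} (h : j ≠ i) (x : Int) :
    (d.set i x).getD j 0 = d.getD j 0 := by
  simp [List.getD, List.getElem?_set_ne (Ne.symm h)]


theorem pv_getD_set_self (d : List Int) {i : Nat} (h : i < d.length) (x : Int) :
    (d.set i x).getD i 0 = x := by
  simp [List.getD, h]


theorem pv_set_getD_self (d : List Int) {i : Nat} (h : i < d.length) :
    d.set i (d.getD i 0) = d := by
  apply List.ext_getElem?
  intro n
  by_cases hn : i = n
  · subst hn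
    simp [h]
  · simp [List.getElem?_set_ne hn]


theorem pv_skip2 (hr : Int) (d : List Int) (h : ¬(0 < d.getD 2 0 ∧ 2 ≤ hr)) :
    major_first hr d = pvLoop0 hr d := by
  by_cases hpos : 0 < hr
  · unfold major_first pvLoop0
    rw [dif_pos hpos, dif_pos hpos, if_neg h]
    split_ifs with h0 h3 h1
    · exact pv_skip2 _ _ (by rw [pv_getD_set_ne d (by decide)]; omega)
    · exact pv_skip2 _ _ (by rw [pv_getD_set_ne d (by decide)]; omega)
    · exact pv_skip2 _ _ (by rw [pv_getD_set_ne d (by decide)]; omega)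
    · rfl
  · unfold major_first pvLoop0
    rw [dif_neg hpos, dif_neg hpos]
termination_by hr.toNat
decreasing_by all_goals omega


theorem pv_skip0 (hr : Int) (d : List Int) (h : ¬(0 < d.getD 0 0 ∧ 5 ≤ hr)) :
    pvLoop0 hr d = pvLoop3 hr d := by
  by_cases hpos : 0 < hr
  · unfold pvLoop0 pvLoop3
    rw [dif_pos hpos, dif_pos hpos, if_neg h]
    split_ifs with h3 h1
    · exact pv_skip0 _ _ (by rw [pv_getD_set_ne d (by decide)]; omega)
    · exact pv_skip0 _ _ (by rw [pv_getD_set_ne d (by decide)]; omega)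
    · rfl
  · unfold pvLoop0 pvLoop3
    rw [dif_neg hpos, dif_neg hpos]
termination_by hr.toNat
decreasing_by all_goals omega


theorem pv_skip3 (hr : Int) (d : List Int) (h : ¬(0 < d.getD 3 0 ∧ 2 ≤ hr)) :
    pvLoop3 hr d = pvLoop1 hr d := by
  by_cases hpos : 0 < hr
  · unfold pvLoop3 pvLoop1
    rw [dif_pos hpos, dif_pos hpos, if_neg h]
    split_ifs with h1
    · exact pv_skip3 _ _ (by rw [pv_getD_set_ne d (by decide)]; omega)
    · rfl
  · unfold pvLoop3 pvLoop1
    rw [dif_neg hpos, dif_neg hpos]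
termination_by hr.toNat
decreasing_by all_goals omega


theorem pv_stage2 (hr : Int) (d : List Int) (h4 : 4 ≤ d.length) (h0 : 0 ≤ hr) :
    major_first hr d =
      pvLoop0 (hr - 2 * max 0 (min (d.getD 2 0) (hr / 2)))
        (d.set 2 (d.getD 2 0 - max 0 (min (d.getD 2 0) (hr / 2)))) := by
  by_cases hb : 0 < d.getD 2 0 ∧ 2 ≤ hr
  · have key : major_first hr d = major_first (hr - 2) (d.set 2 (d.getD 2 0 - 1)) := by
      conv_lhs => rw [major_first]
      rw [dif_pos (show (0:Int) < hr by omega), if_pos hb]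
    rw [key, pv_stage2 (hr - 2) (d.set 2 (d.getD 2 0 - 1)) (by simpa using h4) (by omega),
        pv_getD_set_self d (by omega), List.set_set]
    have e1 : hr - 2 - 2 * max 0 (min (d.getD 2 0 - 1) ((hr - 2) / 2)) =
        hr - 2 * max 0 (min (d.getD 2 0) (hr / 2)) := by omega
    have e2 : d.getD 2 0 - 1 - max 0 (min (d.getD 2 0 - 1) ((hr - 2) / 2)) =
        d.getD 2 0 - max 0 (min (d.getD 2 0) (hr / 2)) := by omega
    rw [e1, e2]
  · rw [pv_skip2 _ _ hb]
    have hm : max 0 (min (d.getD 2 0) (hr / 2)) = 0 := by omega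
    rw [hm, mul_zero, sub_zero, sub_zero, pv_set_getD_self d (by omega)]
termination_by hr.toNat
decreasing_by all_goals omega


theorem pv_stage0 (hr : Int) (d : List Int) (h4 : 4 ≤ d.length) (h0 : 0 ≤ hr) :
    pvLoop0 hr d =
      pvLoop3 (hr - 5 * max 0 (min (d.getD 0 0) (hr / 5)))
        (d.set 0 (d.getD 0 0 - max 0 (min (d.getD 0 0) (hr / 5)))) := by
  by_cases hb : 0 < d.getD 0 0 ∧ 5 ≤ hr
  · have key : pvLoop0 hr d = pvLoop0 (hr - 5) (d.set 0 (d.getD 0 0 - 1)) := by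
      conv_lhs => rw [pvLoop0]
      rw [dif_pos (show (0:Int) < hr by omega), if_pos hb]
    rw [key, pv_stage0 (hr - 5) (d.set 0 (d.getD 0 0 - 1)) (by simpa using h4) (by omega),
        pv_getD_set_self d (by omega), List.set_set]
    have e1 : hr - 5 - 5 * max 0 (min (d.getD 0 0 - 1) ((hr - 5) / 5)) =
        hr - 5 * max 0 (min (d.getD 0 0) (hr / 5)) := by omega
    have e2 : d.getD 0 0 - 1 - max 0 (min (d.getD 0 0 - 1) ((hr - 5) / 5)) =
        d.getD 0 0 - max 0 (min (d.getD 0 0) (hr / 5)) := by omega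
    rw [e1, e2]
  · rw [pv_skip0 _ _ hb]
    have hm : max 0 (min (d.getD 0 0) (hr / 5)) = 0 := by omega
    rw [hm, mul_zero, sub_zero, sub_zero, pv_set_getD_self d (by omega)]
termination_by hr.toNat
decreasing_by all_goals omega


theorem pv_stage3 (hr : Int) (d : List Int) (h4 : 4 ≤ d.length) (h0 : 0 ≤ hr) :
    pvLoop3 hr d =
      pvLoop1 (hr - 2 * max 0 (min (d.getD 3 0) (hr / 2)))
        (d.set 3 (d.getD 3 0 - max 0 (min (d.getD 3 0) (hr / 2)))) := by
  by_cases hb : 0 < d.getD 3 0 ∧ 2 ≤ hr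
  · have key : pvLoop3 hr d = pvLoop3 (hr - 2) (d.set 3 (d.getD 3 0 - 1)) := by
      conv_lhs => rw [pvLoop3]
      rw [dif_pos (show (0:Int) < hr by omega), if_pos hb]
    rw [key, pv_stage3 (hr - 2) (d.set 3 (d.getD 3 0 - 1)) (by simpa using h4) (by omega),
        pv_getD_set_self d (by omega), List.set_set]
    have e1 : hr - 2 - 2 * max 0 (min (d.getD 3 0 - 1) ((hr - 2) / 2)) =
        hr - 2 * max 0 (min (d.getD 3 0) (hr / 2)) := by omega
    have e2 : d.getD 3 0 - 1 - max 0 (min (d.getD 3 0 - 1) ((hr - 2) / 2)) =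
        d.getD 3 0 - max 0 (min (d.getD 3 0) (hr / 2)) := by omega
    rw [e1, e2]
  · rw [pv_skip3 _ _ hb]
    have hm : max 0 (min (d.getD 3 0) (hr / 2)) = 0 := by omega
    rw [hm, mul_zero, sub_zero, sub_zero, pv_set_getD_self d (by omega)]
termination_by hr.toNat
decreasing_by all_goals omega


theorem pv_stage1 (hr : Int) (d : List Int) (h4 : 4 ≤ d.length) (h0 : 0 ≤ hr) :
    pvLoop1 hr d = d.set 1 (d.getD 1 0 - max 0 (min (d.getD 1 0) (hr / 5))) := by
  by_cases hb : 0 < d.getD 1 0 ∧ 5 ≤ hr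
  · have key : pvLoop1 hr d = pvLoop1 (hr - 5) (d.set 1 (d.getD 1 0 - 1)) := by
      conv_lhs => rw [pvLoop1]
      rw [dif_pos (show (0:Int) < hr by omega), if_pos hb]
    rw [key, pv_stage1 (hr - 5) (d.set 1 (d.getD 1 0 - 1)) (by simpa using h4) (by omega),
        pv_getD_set_self d (by omega), List.set_set]
    have e2 : d.getD 1 0 - 1 - max 0 (min (d.getD 1 0 - 1) ((hr - 5) / 5)) =
        d.getD 1 0 - max 0 (min (d.getD 1 0) (hr / 5)) := by omega
    rw [e2]
  · have hm : max 0 (min (d.getD 1 0) (hr / 5)) = 0 := by omega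
    rw [hm, sub_zero, pv_set_getD_self d (by omega)]
    unfold pvLoop1
    by_cases hpos : 0 < hr
    · rw [dif_pos hpos, if_neg hb]
    · rw [dif_neg hpos]
termination_by hr.toNat
decreasing_by all_goals omega


theorem pv_fixCat_eq (d : List Int) (hr : Int) (i : Nat) (c : Int) (hc : 0 < c)
    (hi : i < d.length) (_h0 : 0 ≤ hr) :
    pvFixCat (d, hr) (i, c) =
      (d.set i (d.getD i 0 - max 0 (min (d.getD i 0) (hr / c))),
       hr - c * max 0 (min (d.getD i 0) (hr / c))) := by
  simp only [pvFixCat, PySem.Int.floordiv_eq_ediv_of_pos hc]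
  by_cases hn : 0 < min (d.getD i 0) (hr / c)
  · rw [if_pos hn]
    have hm : max 0 (min (d.getD i 0) (hr / c)) = min (d.getD i 0) (hr / c) := by omega
    rw [hm]
  · rw [if_neg hn]
    have hm : max 0 (min (d.getD i 0) (hr / c)) = 0 := by omega
    rw [hm, mul_zero, sub_zero, sub_zero, pv_set_getD_self d hi]


-- ===== VERDICT (by name: the statement is the Claim_ definition above) =====
theorem major_first_spec : Claim_equal_major_first := by
  intro hr d _ hpre
  unfold Spec_major_first major_first_alt
  by_cases hpos : 0 < hr
  · have h4 : 4 ≤ d.length := by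
      rcases hpre with h | h
      · omega
      · exact h
    rw [if_pos hpos]
    simp only [List.foldl_cons, List.foldl_nil]
    rw [pv_fixCat_eq d hr 2 2 (by norm_num) (by omega) (by omega)]
    rw [pv_fixCat_eq _ _ 0 5 (by norm_num) (by simp; omega) (by omega)]
    rw [pv_fixCat_eq _ _ 3 2 (by norm_num) (by simp; omega) (by omega)]
    rw [pv_fixCat_eq _ _ 1 5 (by norm_num) (by simp; omega) (by omega)]
    rw [pv_stage2 hr d h4 (by omega)]
    rw [pv_stage0 _ _ (by simp; omega) (by omega)]
    rw [pv_stage3 _ _ (by simp; omega) (by omega)]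
    rw [pv_stage1 _ _ (by simp; omega) (by omega)]
  · rw [if_neg hpos]
    unfold major_first
    rw [dif_neg hpos]
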